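-- pv_equiv track=rewrite | github.com/skywind3000/script | lib/asclib/core.py | tabulify
-- ===== SOURCE A (Python) =====
-- def tabulify(rows, style = 0):
--     colsize = {}
--     maxcol = 0
--     output = []
--     if not rows:
--         return ''
--     for row in rows:
--         maxcol = max(len(row), maxcol)
--         for col, text in enumerate(row):
--             text = str(text)
--             size = len(text)
--             if col not in colsize:
--                 colsize[col] = size
--             else:
--                 colsize[col] = max(size, colsize[col])
--     if maxcol <= 0:
--         return ''
--     def gettext(row, col):
--         csize = colsize[col]
--         if row >= len(rows):
--             return ' ' * (csize + 2)
--         row = rows[row]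
--         if col >= len(row):
--             return ' ' * (csize + 2)
--         text = str(row[col])
--         padding = 2 + csize - len(text)
--         pad1 = 1
--         pad2 = padding - pad1
--         return (' ' * pad1) + text + (' ' * pad2)
--     if style == 0:
--         for y, row in enumerate(rows):
--             line = ''.join([ gettext(y, x) for x in range(maxcol) ])
--             output.append(line)
--     elif style == 1:
--         if rows:
--             newrows = rows[:1]
--             head = [ '-' * colsize[i] for i in range(maxcol) ]
--             newrows.append(head)
--             newrows.extend(rows[1:])
--             rows = newrows
--         for y, row in enumerate(rows):
--             line = ''.join([ gettext(y, x) for x in range(maxcol) ])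
--             output.append(line)
--     elif style == 2:
--         sep = '+'.join([ '-' * (colsize[x] + 2) for x in range(maxcol) ])
--         sep = '+' + sep + '+'
--         for y, row in enumerate(rows):
--             output.append(sep)
--             line = '|'.join([ gettext(y, x) for x in range(maxcol) ])
--             output.append('|' + line + '|')
--         output.append(sep)
--     return '\n'.join(output)
-- ===== SOURCE B (Python) =====
-- def tabulify(rows, style=0):
--     if not rows:
--         return ''
--     maxcol = max(map(len, rows))
--     if maxcol <= 0:
--         return ''
--     # column-major: build each fully padded column, then transpose
--     cols = []
--     for c in range(maxcol):
--         texts = [str(r[c]) if c < len(r) else None for r in rows]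
--         w = max(len(t) for t in texts if t is not None)
--         col = [' ' * (w + 2) if t is None else ' ' + t + ' ' * (1 + w - len(t))
--                for t in texts]
--         if style == 1:
--             col.insert(1, ' ' + '-' * w + ' ')
--         cols.append(col)
--     if style == 2:
--         sep = '+' + '+'.join('-' * len(col[0]) for col in cols) + '+'
--         out = []
--         for line in zip(*cols):
--             out.append(sep)
--             out.append('|' + '|'.join(line) + '|')
--         out.append(sep)
--         return '\n'.join(out)
--     if style == 0 or style == 1:
--         return '\n'.join(''.join(line) for line in zip(*cols))
--     return ''
-- ===== Notes on version B (the rewrite author's own statement) =====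
-- stated objective: alternative
-- what changed: B builds the table column-major: it materializes each fully padded column (the column's width, its blank cells for ragged rows, and the style-1 dash cell spliced in at position 1), then transposes with zip(*cols) and joins the resulting rows, instead of A's colsize dict plus a row-major loop calling an on-demand gettext(y,x) closure per cell.
import Mathlib
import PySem

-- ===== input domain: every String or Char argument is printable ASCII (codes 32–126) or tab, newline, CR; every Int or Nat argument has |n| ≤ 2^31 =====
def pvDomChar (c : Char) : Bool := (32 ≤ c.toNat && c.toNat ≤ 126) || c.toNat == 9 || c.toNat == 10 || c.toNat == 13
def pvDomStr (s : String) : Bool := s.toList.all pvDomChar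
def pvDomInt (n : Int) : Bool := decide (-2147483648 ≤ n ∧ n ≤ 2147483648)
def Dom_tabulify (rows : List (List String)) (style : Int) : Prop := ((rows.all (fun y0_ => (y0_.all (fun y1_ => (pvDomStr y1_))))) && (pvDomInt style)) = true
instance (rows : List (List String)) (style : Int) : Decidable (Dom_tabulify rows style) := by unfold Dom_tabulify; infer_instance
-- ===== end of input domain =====

-- B builds the table COLUMN-MAJOR: each fully padded column (width computed from that column's
-- cells, style-1 dash cell spliced in, missing cells blank) is materialized, and the output rows
-- are obtained by transposing (zip(*cols)) and joining; A is row-major via a colsize dict and an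
-- on-demand gettext(y,x) closure. Objective: alternative decomposition, same asymptotic cost.

-- ===== PORT A =====
-- Python len(str(cell)); cells are strings here, so str() is the identity
def pvLen (s : String) : Int := PySem.Str.len s
-- ' ' * n  /  '-' * n  (empty for n ≤ 0, as in Python)
def pvSpaces (n : Int) : List Char := List.replicate n.toNat ' '
def pvDashes (n : Int) : List Char := List.replicate n.toNat '-'

-- body of A's 'for col, text in enumerate(row)' updating colsize
def pvColStep (d : PySem.Dict Int Int) (p : Int × String) : PySem.Dict Int Int :=
  let size := pvLen p.2
  match d.get? p.1 with
  | none => d.insert p.1 size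
  | some v => d.insert p.1 (max size v)

-- A's gettext(row, col); it closes over the CURRENT rows list and colsize.
-- colsize[col]: every call A makes has col among the keys, so getD's default is never used.
def pvGettext (rows : List (List String)) (colsize : PySem.Dict Int Int) (y x : Int) : List Char :=
  let csize := colsize.getD x 0
  if (rows.length : Int) ≤ y then pvSpaces (csize + 2)
  else
    let row := PySem.List.pyGetD rows y []
    if (row.length : Int) ≤ x then pvSpaces (csize + 2)
    else
      let text := PySem.List.pyGetD row x ""
      let padding := 2 + csize - pvLen text
      let pad1 : Int := 1
      let pad2 := padding - pad1
      pvSpaces pad1 ++ text.toList ++ pvSpaces pad2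

def tabulify (rows : List (List String)) (style : Int) : String :=
  if rows = [] then "" else
  let acc := rows.foldl
    (fun (acc : PySem.Dict Int Int × Int) row =>
      ((PySem.List.enumerate row).foldl pvColStep acc.1,
       max (row.length : Int) acc.2))
    (PySem.Dict.empty, 0)
  let colsize := acc.1
  let maxcol := acc.2
  if maxcol ≤ 0 then "" else
  let output : List (List Char) :=
    if style = 0 then
      (PySem.List.enumerate rows).foldl (fun out p =>
        out ++ [PySem.Chars.join [] ((PySem.List.pyRange 0 maxcol).map (fun x => pvGettext rows colsize p.1 x))]) []
    else if style = 1 then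
      let newrows := PySem.List.slice rows none (some 1)
        ++ [(PySem.List.pyRange 0 maxcol).map (fun i => String.ofList (pvDashes (colsize.getD i 0)))]
        ++ PySem.List.slice rows (some 1) none
      (PySem.List.enumerate newrows).foldl (fun out p =>
        out ++ [PySem.Chars.join [] ((PySem.List.pyRange 0 maxcol).map (fun x => pvGettext newrows colsize p.1 x))]) []
    else if style = 2 then
      let sep := '+' :: PySem.Chars.join ['+'] ((PySem.List.pyRange 0 maxcol).map (fun x => pvDashes (colsize.getD x 0 + 2))) ++ ['+']
      ((PySem.List.enumerate rows).foldl (fun out p =>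
        out ++ [sep, '|' :: PySem.Chars.join ['|'] ((PySem.List.pyRange 0 maxcol).map (fun x => pvGettext rows colsize p.1 x)) ++ ['|']]) []) ++ [sep]
    else []
  String.ofList (PySem.Chars.join ['\n'] output)

-- ===== PORT B =====
-- width of one column: max(len(t) for t in texts if t is not None); the generator is never
-- empty on B's calls (c < maxcol guarantees a present cell), so the default 0 is never used
def pvColWidth (texts : List (Option String)) : Int :=
  PySem.List.maxD ((texts.filterMap id).map (fun s => (s.toList.length : Int))) (fun x => x) 0

-- one cell of a padded column: blank for a missing cell, else ' '+t+' '*(1+w-len(t))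
def pvCellF (w : Int) (t : Option String) : List Char :=
  match t with
  | none => List.replicate (w + 2).toNat ' '
  | some s => ' ' :: s.toList ++ List.replicate (1 + w - (s.toList.length : Int)).toNat ' '

-- the loop body of B: the fully padded column c (with the style-1 dash cell spliced in at 1)
def pvColOf (rows : List (List String)) (style : Int) (c : Int) : List (List Char) :=
  let texts := rows.map (fun r => if c < (r.length : Int) then some (PySem.List.pyGetD r c "") else none)
  let w := pvColWidth texts
  let col := texts.map (pvCellF w)
  if style = 1 then PySem.List.insert col 1 (' ' :: List.replicate w.toNat '-' ++ [' ']) else col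

-- zip(*cols): truncating transpose (all columns have equal length on B's calls)
def pvZip (cols : List (List (List Char))) : List (List (List Char)) :=
  match cols with
  | [] => []
  | c0 :: rest =>
    (List.range (rest.foldl (fun n c => min n c.length) c0.length)).map
      (fun i => (c0 :: rest).map (fun col => col.getD i []))

def tabulify_alt (rows : List (List String)) (style : Int) : String :=
  if rows = [] then "" else
  let maxcol := PySem.List.maxD (rows.map (fun r => (r.length : Int))) (fun x => x) 0
  if maxcol ≤ 0 then "" else
  let cols := (PySem.List.pyRange 0 maxcol).foldl (fun cs c => cs ++ [pvColOf rows style c]) []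
  if style = 2 then
    -- len(col[0]): columns are never empty (rows ≠ []), so headD's default is never used
    let sep := '+' :: PySem.Chars.join ['+'] (cols.map (fun col => List.replicate (col.headD []).length '-')) ++ ['+']
    let out := (pvZip cols).foldl (fun out line => out ++ [sep, '|' :: PySem.Chars.join ['|'] line ++ ['|']]) []
    String.ofList (PySem.Chars.join ['\n'] (out ++ [sep]))
  else if style = 0 ∨ style = 1 then
    String.ofList (PySem.Chars.join ['\n'] ((pvZip cols).map (PySem.Chars.join [])))
  else ""

-- ===== PRECONDITION & SPEC =====
def Spec_tabulify (rows : List (List String)) (style : Int) (out : String) : Prop := out = tabulify_alt rows style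
instance (rows : List (List String)) (style : Int) (out : String) : Decidable (Spec_tabulify rows style out) := by unfold Spec_tabulify; infer_instance

-- ===== CLAIM (what is proved, stated in full; the proofs are below) =====
def Claim_equal_tabulify : Prop := ∀ (rows : List (List String)) (style : Int), Dom_tabulify rows style → Spec_tabulify rows style (tabulify rows style)

-- ===== LEMMAS AND PROOFS =====

-- the sizes appearing in column c, in row order, and the column width they induce
def pvSizes (rows : List (List String)) (c : Int) : List Int :=
  (rows.filter (fun r => decide (c < (r.length : Int)))).map
    (fun r => pvLen (PySem.List.pyGetD r c ""))

def pvWfun (rows : List (List String)) (c : Int) : Int :=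
  PySem.List.maxD (pvSizes rows c) (fun x => x) 0

def pvMerge (o : Option Int) (sz : Int) : Option Int :=
  some (match o with | none => sz | some v => max sz v)

-- B's texts list for column c
def pvTexts (rows : List (List String)) (c : Int) : List (Option String) :=
  rows.map (fun r => if c < (r.length : Int) then some (PySem.List.pyGetD r c "") else none)

theorem pvMaxD_cons (x : Int) (t : List Int) (d : Int) :
    PySem.List.maxD (x :: t) (fun y => y) d = t.foldl max x := by
  rcases t with _ | ⟨y, t⟩
  · rfl
  · show (PySem.List.max? (x :: y :: t) (fun y => y)).getD d = _
    rw [PySem.List.max?_id_cons]; rfl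

theorem pvColStep_enum_get? (row : List String) (s : Int) (d : PySem.Dict Int Int) (c : Int) :
    ((PySem.List.enumerate row s).foldl pvColStep d).get? c =
      if s ≤ c ∧ c < s + (row.length : Int) then
        pvMerge (d.get? c) (pvLen (PySem.List.pyGetD row (c - s) ""))
      else d.get? c := by
  induction row generalizing s d with
  | nil =>
    simp only [PySem.List.enumerate_nil, List.foldl_nil, List.length_nil, Nat.cast_zero]
    rw [if_neg (by omega)]
  | cons x t ih =>
    rw [PySem.List.enumerate_cons]
    simp only [List.foldl_cons]
    rw [ih (s + 1) (pvColStep d (s, x))]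
    have hself : (pvColStep d (s, x)).get? s = pvMerge (d.get? s) (pvLen x) := by
      unfold pvColStep pvMerge
      cases hds : d.get? s <;> simp [PySem.Dict.get?_insert_self]
    have hne : c ≠ s → (pvColStep d (s, x)).get? c = d.get? c := by
      intro hc
      unfold pvColStep
      cases hds : d.get? s <;> simp [PySem.Dict.get?_insert_of_ne _ _ hc]
    simp only [List.length_cons, Nat.cast_add, Nat.cast_one]
    by_cases hc : c = s
    · subst hc
      rw [if_neg (by omega), if_pos (by constructor <;> omega), hself]
      congr 1
      rw [sub_self]
      rw [PySem.List.pyGetD_zero_cons]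
    · by_cases hin : s + 1 ≤ c ∧ c < s + 1 + (t.length : Int)
      · rw [if_pos hin, if_pos (by omega), hne hc]
        congr 1
        have h0 : 0 ≤ c - (s + 1) := by omega
        have h1 : c - (s + 1) < (t.length : Int) := by omega
        rw [PySem.List.pyGetD_eq_getElem t _ h0 h1,
            PySem.List.pyGetD_eq_getElem (x :: t) _ (by omega)
              (by simp only [List.length_cons]; push_cast; omega)]
        have hsucc : (c - s).toNat = (c - (s + 1)).toNat + 1 := by omega
        simp [hsucc]
      · rw [if_neg hin, if_neg (by omega), hne hc]

theorem pvDict_get? (rs : List (List String)) (d : PySem.Dict Int Int) (c : Int) (hc : 0 ≤ c) :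
    (rs.foldl (fun d row => (PySem.List.enumerate row).foldl pvColStep d) d).get? c =
      (pvSizes rs c).foldl pvMerge (d.get? c) := by
  induction rs generalizing d with
  | nil => rfl
  | cons r t ih =>
    simp only [List.foldl_cons]
    rw [ih]
    have hstep := pvColStep_enum_get? r 0 d c
    unfold pvSizes
    by_cases h : c < (r.length : Int)
    · rw [List.filter_cons_of_pos (by simpa using h)]
      simp only [List.map_cons, List.foldl_cons]
      have : ((PySem.List.enumerate r).foldl pvColStep d).get? c
          = pvMerge (d.get? c) (pvLen (PySem.List.pyGetD r c "")) := by
        rw [hstep, if_pos (by constructor <;> omega)]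
        simp
      rw [this]
    · rw [List.filter_cons_of_neg (by simpa using h)]
      have : ((PySem.List.enumerate r).foldl pvColStep d).get? c = d.get? c := by
        rw [hstep, if_neg (by omega)]
      rw [this]

theorem pvFoldl_merge_some (t : List Int) (a : Int) :
    t.foldl pvMerge (some a) = some (t.foldl max a) := by
  induction t generalizing a with
  | nil => rfl
  | cons z t ih => simpa [pvMerge, max_comm] using ih (max a z)

theorem pvFoldl_max_len (rs : List (List String)) (a : Int) :
    rs.foldl (fun n row => max (row.length : Int) n) a =
      (rs.map (fun r => (r.length : Int))).foldl max a := by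
  induction rs generalizing a with
  | nil => rfl
  | cons r t ih => simpa [max_comm] using ih (max a (r.length : Int))

-- B's texts generator, filtered, is the present cells of column c in row order
theorem pvFilterMap_texts (rows : List (List String)) (c : Int) :
    (pvTexts rows c).filterMap id =
      (rows.filter (fun r => decide (c < (r.length : Int)))).map (fun r => PySem.List.pyGetD r c "") := by
  unfold pvTexts
  rw [List.filterMap_map]
  induction rows with
  | nil => rfl
  | cons r t ih =>
    simp only [List.filterMap_cons, List.filter_cons]
    simp only [Function.comp_def, id_eq] at ih
    by_cases h : c < (r.length : Int)
    · simp [h, ih]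
    · simp [h, ih]

-- B's per-column width equals the width A's dict computes for that column
theorem pvColWidth_eq (rows : List (List String)) (c : Int) :
    pvColWidth (pvTexts rows c) = pvWfun rows c := by
  unfold pvColWidth pvWfun pvSizes
  rw [pvFilterMap_texts, List.map_map]
  simp [Function.comp_def, pvLen, PySem.Str.len_eq]

theorem pvWfun_nonneg (rows : List (List String)) (c : Int) : 0 ≤ pvWfun rows c := by
  unfold pvWfun
  rcases h : pvSizes rows c with _ | ⟨s0, t⟩
  · simp [PySem.List.maxD, PySem.List.max?]
  · rw [pvMaxD_cons]
    have hle := (PySem.List.le_foldl_max t s0).1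
    have h0 : 0 ≤ s0 := by
      have : s0 ∈ pvSizes rows c := by rw [h]; exact List.mem_cons_self
      unfold pvSizes at this
      obtain ⟨r, _, hr⟩ := List.mem_map.1 this
      rw [← hr]
      unfold pvLen
      rw [PySem.Str.len_eq]
      positivity
    omega

-- A's gettext at row index k is exactly B's padded cell of that row
theorem pvGettext_eq_cellF (rows' : List (List String)) (colsize : PySem.Dict Int Int)
    (c : Int) (k : Nat) (hk : k < rows'.length) :
    pvGettext rows' colsize (k : Int) c =
      pvCellF (colsize.getD c 0)
        (if c < ((rows'[k]).length : Int) then some (PySem.List.pyGetD rows'[k] c "") else none) := by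
  unfold pvGettext pvCellF
  rw [if_neg (by exact_mod_cast Nat.not_le.mpr hk)]
  have hrow : PySem.List.pyGetD rows' (k : Int) [] = rows'[k] := by
    rw [PySem.List.pyGetD_eq_getElem _ _ (by positivity) (by exact_mod_cast hk)]
    simp
  rw [hrow]
  by_cases hc : c < ((rows'[k]).length : Int)
  · rw [if_neg (by omega), if_pos hc]
    simp only [pvSpaces, pvLen, PySem.Str.len_eq]
    have e : 2 + colsize.getD c 0 - (((PySem.List.pyGetD rows'[k] c "").toList.length : Nat) : Int) - 1
        = 1 + colsize.getD c 0 - (((PySem.List.pyGetD rows'[k] c "").toList.length : Nat) : Int) := by ring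
    rw [e]
    simp
  · rw [if_pos (by omega), if_neg hc]
    rfl

-- pvZip of a nonempty list of equal-length columns is the index-indexed transpose
theorem pvZip_const_length (cols : List (List (List Char))) (L : Nat)
    (hne : cols ≠ []) (hlen : ∀ col ∈ cols, col.length = L) :
    pvZip cols = (List.range L).map (fun i => cols.map (fun col => col.getD i [])) := by
  cases cols with
  | nil => exact absurd rfl hne
  | cons c0 rest =>
    have hfold : rest.foldl (fun n c => min n c.length) c0.length = L := by
      have h0 : c0.length = L := hlen c0 List.mem_cons_self
      have hall : ∀ (t : List (List (List Char))), (∀ col ∈ t, col.length = L) →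
          t.foldl (fun n c => min n c.length) L = L := by
        intro t
        induction t with
        | nil => intro _; rfl
        | cons x s ih =>
          intro h
          simp only [List.foldl_cons, h x List.mem_cons_self, min_self]
          exact ih (fun col hc => h col (List.mem_cons_of_mem _ hc))
      rw [h0]
      exact hall rest (fun col hc => hlen col (List.mem_cons_of_mem _ hc))
    have hdef : pvZip (c0 :: rest) =
        (List.range (rest.foldl (fun n c => min n c.length) c0.length)).map
          (fun i => (c0 :: rest).map (fun col => col.getD i [])) := rfl
    rw [hdef, hfold]

theorem pvColOf_length (rows : List (List String)) (style c : Int) (h1 : style ≠ 1) :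
    (pvColOf rows style c).length = rows.length := by
  unfold pvColOf
  rw [if_neg h1]
  simp

theorem pvColOf_length1 (rows : List (List String)) (c : Int) :
    (pvColOf rows 1 c).length = rows.length + 1 := by
  unfold pvColOf
  rw [if_pos rfl]
  rw [PySem.List.length_insert]
  simp

-- cell extraction from a style-0/2 column
theorem pvColOf_getD (rows : List (List String)) (style c : Int) (h1 : style ≠ 1)
    (k : Nat) (hk : k < rows.length) :
    (pvColOf rows style c).getD k [] =
      pvCellF (pvWfun rows c)
        (if c < ((rows[k]).length : Int) then some (PySem.List.pyGetD rows[k] c "") else none) := by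
  unfold pvColOf
  rw [if_neg h1]
  have hw : pvColWidth (rows.map (fun r => if c < (r.length : Int) then some (PySem.List.pyGetD r c "") else none)) = pvWfun rows c :=
    pvColWidth_eq rows c
  rw [hw]
  rw [List.getD_eq_getElem _ _ (by simpa using hk)]
  simp

-- cell extraction from a style-1 column of rows = r0 :: rest
theorem pvColOf1_getD (r0 : List String) (rest : List (List String)) (c : Int)
    (k : Nat) (_hk : k < rest.length + 2) :
    (pvColOf (r0 :: rest) 1 c).getD k [] =
      (pvCellF (pvWfun (r0 :: rest) c)
          (if c < ((r0).length : Int) then some (PySem.List.pyGetD r0 c "") else none)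
        :: (' ' :: List.replicate (pvWfun (r0 :: rest) c).toNat '-' ++ [' '])
        :: rest.map (fun r =>
             pvCellF (pvWfun (r0 :: rest) c)
               (if c < (r.length : Int) then some (PySem.List.pyGetD r c "") else none))).getD k [] := by
  unfold pvColOf
  rw [if_pos rfl]
  have hw : pvColWidth ((r0 :: rest).map (fun r => if c < (r.length : Int) then some (PySem.List.pyGetD r c "") else none)) = pvWfun (r0 :: rest) c :=
    pvColWidth_eq (r0 :: rest) c
  rw [hw]
  simp only [List.map_cons]
  rw [PySem.List.insert_ofNat _ 1 _ (by simp)]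
  simp [Function.comp_def]


-- the transposed grid of style-0/2 columns is A's row-major table over rows itself
theorem pvGrid_eq (rows : List (List String)) (colsize : PySem.Dict Int Int) (m style : Int)
    (h1 : style ≠ 1) (_hne : rows ≠ []) (hm : 0 < m)
    (hw : ∀ c, 0 ≤ c → c < m → colsize.getD c 0 = pvWfun rows c) :
    pvZip ((PySem.List.pyRange 0 m).map (pvColOf rows style))
      = (PySem.List.enumerate rows).map (fun p =>
          (PySem.List.pyRange 0 m).map (fun x => pvGettext rows colsize p.1 x)) := by
  have hlen : ∀ col ∈ (PySem.List.pyRange 0 m).map (pvColOf rows style), col.length = rows.length := by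
    intro col hc
    obtain ⟨c, _, rfl⟩ := List.mem_map.1 hc
    exact pvColOf_length rows style c h1
  have hcne : (PySem.List.pyRange 0 m).map (pvColOf rows style) ≠ [] := by
    have : ((PySem.List.pyRange 0 m).map (pvColOf rows style)).length = (m - 0).toNat := by
      rw [List.length_map, PySem.List.length_pyRange_one]
    intro hnil
    rw [hnil] at this
    simp at this
    omega
  rw [pvZip_const_length _ rows.length hcne hlen]
  apply List.ext_getElem
  · simp [PySem.List.length_enumerate]
  · intro k hk1 hk2
    have hkr : k < rows.length := by simpa using hk1
    simp only [List.getElem_map, List.getElem_range, PySem.List.getElem_enumerate]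
    rw [List.map_map]
    apply List.map_congr_left
    intro c hc
    obtain ⟨hc0, hc1⟩ := PySem.List.mem_pyRange_one.1 hc
    simp only [Function.comp_def]
    rw [pvColOf_getD rows style c h1 k hkr, zero_add,
        pvGettext_eq_cellF rows colsize c k hkr, hw c hc0 hc1]

-- the transposed grid of style-1 columns is A's row-major table over rows with the dash row spliced in
theorem pvGrid1_eq (r0 : List String) (rest : List (List String)) (colsize : PySem.Dict Int Int)
    (m : Int) (hm : 0 < m)
    (hw : ∀ c, 0 ≤ c → c < m → colsize.getD c 0 = pvWfun (r0 :: rest) c) :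
    pvZip ((PySem.List.pyRange 0 m).map (pvColOf (r0 :: rest) 1))
      = (PySem.List.enumerate
            (r0 :: ((PySem.List.pyRange 0 m).map (fun i => String.ofList (pvDashes (colsize.getD i 0)))) :: rest)).map
          (fun p => (PySem.List.pyRange 0 m).map (fun x =>
            pvGettext (r0 :: ((PySem.List.pyRange 0 m).map (fun i => String.ofList (pvDashes (colsize.getD i 0)))) :: rest) colsize p.1 x)) := by
  set head := (PySem.List.pyRange 0 m).map (fun i => String.ofList (pvDashes (colsize.getD i 0))) with hhead
  set rows' := r0 :: head :: rest with hrows'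
  have hlen : ∀ col ∈ (PySem.List.pyRange 0 m).map (pvColOf (r0 :: rest) 1), col.length = rest.length + 2 := by
    intro col hc
    obtain ⟨c, _, rfl⟩ := List.mem_map.1 hc
    rw [pvColOf_length1]
    simp
  have hcne : (PySem.List.pyRange 0 m).map (pvColOf (r0 :: rest) 1) ≠ [] := by
    have : ((PySem.List.pyRange 0 m).map (pvColOf (r0 :: rest) 1)).length = (m - 0).toNat := by
      rw [List.length_map, PySem.List.length_pyRange_one]
    intro hnil
    rw [hnil] at this
    simp at this
    omega
  rw [pvZip_const_length _ (rest.length + 2) hcne hlen]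
  apply List.ext_getElem
  · simp [PySem.List.length_enumerate, hrows']
  · intro k hk1 hk2
    have hkr : k < rest.length + 2 := by simpa using hk1
    have hkr' : k < rows'.length := by simp [hrows']; omega
    simp only [List.getElem_map, List.getElem_range, PySem.List.getElem_enumerate]
    rw [List.map_map]
    apply List.map_congr_left
    intro c hc
    obtain ⟨hc0, hc1⟩ := PySem.List.mem_pyRange_one.1 hc
    simp only [Function.comp_def]
    rw [pvColOf1_getD r0 rest c k hkr, zero_add,
        pvGettext_eq_cellF rows' colsize c k hkr', hw c hc0 hc1]
    match k, hkr with
    | 0, _ => simp [hrows']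
    | 1, _ =>
      -- the spliced dash cell vs gettext on the dash row
      simp only [List.getD_cons_succ, List.getD_cons_zero]
      have e1 : rows'[1] = head := rfl
      rw [e1]
      have hl : ((head).length : Int) = m := by
        rw [hhead, List.length_map, PySem.List.length_pyRange_one]
        omega
      rw [if_pos (by rw [hl]; exact hc1)]
      have hgetd : PySem.List.pyGetD head c "" = String.ofList (pvDashes (colsize.getD c 0)) := by
        rw [hhead]
        exact PySem.List.pyGetD_map_pyRange_of_nonneg _ _ _ _ hc0 hc1
      rw [hgetd, hw c hc0 hc1]
      simp only [pvCellF]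
      have hnn : 0 ≤ pvWfun (r0 :: rest) c := pvWfun_nonneg (r0 :: rest) c
      rw [String.toList_ofList]
      unfold pvDashes
      simp only [List.length_replicate]
      have h1' : (1 + pvWfun (r0 :: rest) c - ((pvWfun (r0 :: rest) c).toNat : Int)).toNat = 1 := by omega
      rw [h1']
      simp
    | (j + 2), _ =>
      have hj : j < rest.length := by omega
      simp only [List.getD_cons_succ]
      rw [List.getD_eq_getElem _ _ (by simpa using hj), List.getElem_map]
      simp [hrows']


-- B's '-'*len(col[0]) separator pieces are A's '-'*(colsize[x]+2) pieces
theorem pvSep_eq (r0 : List String) (rest : List (List String)) (colsize : PySem.Dict Int Int)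
    (m : Int)
    (hw : ∀ c, 0 ≤ c → c < m → colsize.getD c 0 = pvWfun (r0 :: rest) c) :
    ((PySem.List.pyRange 0 m).map (pvColOf (r0 :: rest) 2)).map
        (fun col => List.replicate (col.headD []).length '-')
      = (PySem.List.pyRange 0 m).map (fun x => pvDashes (colsize.getD x 0 + 2)) := by
  rw [List.map_map]
  apply List.map_congr_left
  intro c hc
  obtain ⟨hc0, hc1⟩ := PySem.List.mem_pyRange_one.1 hc
  simp only [Function.comp_def]
  rw [hw c hc0 hc1]
  have hnn : 0 ≤ pvWfun (r0 :: rest) c := pvWfun_nonneg (r0 :: rest) c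
  unfold pvColOf
  rw [if_neg (by norm_num)]
  have ht : ((r0 :: rest).map (fun r => if c < (r.length : Int) then some (PySem.List.pyGetD r c "") else none))
      = pvTexts (r0 :: rest) c := rfl
  rw [ht, pvColWidth_eq (r0 :: rest) c]
  simp only [pvTexts, List.map_cons, List.headD_cons]
  unfold pvDashes
  by_cases h : c < ((r0).length : Int)
  · rw [if_pos h]
    simp only [pvCellF]
    have hle : (((PySem.List.pyGetD r0 c "").toList.length : Nat) : Int) ≤ pvWfun (r0 :: rest) c := by
      have hsz : pvSizes (r0 :: rest) c
          = pvLen (PySem.List.pyGetD r0 c "") :: pvSizes rest c := by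
        unfold pvSizes
        simp [h]
      unfold pvWfun
      rw [hsz, pvMaxD_cons]
      have := (PySem.List.le_foldl_max (pvSizes rest c) (pvLen (PySem.List.pyGetD r0 c ""))).1
      unfold pvLen at this
      rw [PySem.Str.len_eq] at this
      exact this
    congr 1
    simp only [List.length_cons, List.length_append, List.length_replicate]
    omega
  · rw [if_neg h]
    simp [pvCellF]

theorem tab_eq (rows : List (List String)) (style : Int) :
    tabulify rows style = tabulify_alt rows style := by
  cases rows with
  | nil => rfl
  | cons r0 rest =>
    have hsplit : (r0 :: rest).foldl
        (fun (acc : PySem.Dict Int Int × Int) row =>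
          ((PySem.List.enumerate row).foldl pvColStep acc.1, max (row.length : Int) acc.2))
        (PySem.Dict.empty, 0)
        = ((r0 :: rest).foldl (fun d row => (PySem.List.enumerate row).foldl pvColStep d) PySem.Dict.empty,
           (r0 :: rest).foldl (fun n row => max (row.length : Int) n) 0) :=
      PySem.List.foldl_prod_mk (fun d row => (PySem.List.enumerate row).foldl pvColStep d)
        (fun n row => max (row.length : Int) n) (r0 :: rest) PySem.Dict.empty 0
    simp only [tabulify, tabulify_alt, hsplit]
    rw [if_neg (List.cons_ne_nil r0 rest), if_neg (List.cons_ne_nil r0 rest)]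
    set D := (r0 :: rest).foldl (fun d row => (PySem.List.enumerate row).foldl pvColStep d) PySem.Dict.empty with hD
    set mA := (r0 :: rest).foldl (fun n row => max (row.length : Int) n) 0 with hmA
    have hfold : mA = (rest.map (fun r => (r.length : Int))).foldl max (r0.length : Int) := by
      rw [hmA, pvFoldl_max_len]
      simp only [List.map_cons, List.foldl_cons]
      rw [max_eq_right (Int.natCast_nonneg _)]
    have hm : PySem.List.maxD ((r0 :: rest).map (fun r => (r.length : Int))) (fun x => x) 0 = mA := by
      simp only [List.map_cons]
      rw [pvMaxD_cons, ← hfold]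
    rw [hm]
    by_cases hm0 : mA ≤ 0
    · simp [hm0]
    · rw [if_neg hm0, if_neg hm0]
      have hget : ∀ c, 0 ≤ c → c < mA → D.get? c = some (pvWfun (r0 :: rest) c) := by
        intro c h0 h1
        have hdg := pvDict_get? (r0 :: rest) PySem.Dict.empty c h0
        rw [← hD] at hdg
        rw [show (PySem.Dict.empty : PySem.Dict Int Int).get? c = none from rfl] at hdg
        have hmem : ∃ r ∈ r0 :: rest, c < (r.length : Int) := by
          rcases PySem.List.foldl_max_mem (rest.map (fun r => (r.length : Int))) (r0.length : Int) with he | he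
          · exact ⟨r0, List.mem_cons_self, by rw [hfold, he] at h1; exact h1⟩
          · obtain ⟨r, hr, hlen⟩ := List.mem_map.1 he
            exact ⟨r, List.mem_cons_of_mem _ hr, by rw [hfold, ← hlen] at h1; exact h1⟩
        obtain ⟨r, hrmem, hrc⟩ := hmem
        have hne : pvSizes (r0 :: rest) c ≠ [] := by
          unfold pvSizes
          simp only [ne_eq, List.map_eq_nil_iff, List.filter_eq_nil_iff]
          push Not
          exact ⟨r, hrmem, by simpa using hrc⟩
        rcases hsz : pvSizes (r0 :: rest) c with _ | ⟨s0, t⟩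
        · exact absurd hsz hne
        · rw [hsz, List.foldl_cons, show pvMerge none s0 = some s0 from rfl,
              pvFoldl_merge_some] at hdg
          rw [hdg]
          unfold pvWfun
          rw [hsz, pvMaxD_cons]
      have hw : ∀ c, 0 ≤ c → c < mA → D.getD c 0 = pvWfun (r0 :: rest) c := by
        intro c h0 h1
        rw [PySem.Dict.getD_eq_get?_getD, hget c h0 h1, Option.getD_some]
      have hLpos : (0:Int) < mA := by omega
      by_cases hs0 : style = 0
      · subst hs0
        rw [if_pos rfl, if_neg (by norm_num), if_pos (by norm_num)]
        rw [PySem.List.foldl_append_singleton_eq_map, PySem.List.foldl_append_singleton_eq_map]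
        simp only [List.nil_append]
        rw [pvGrid_eq (r0 :: rest) D mA 0 (by norm_num) (List.cons_ne_nil r0 rest) hLpos hw]
        simp [List.map_map, Function.comp_def]
      · by_cases hs1 : style = 1
        · subst hs1
          rw [if_neg (by norm_num), if_pos rfl, if_neg (by norm_num), if_pos (by norm_num)]
          have hsl1 : PySem.List.slice (r0 :: rest) none (some 1) = [r0] := by
            simpa using PySem.List.slice_to_natCast (r0 :: rest) 1
          have hsl2 : PySem.List.slice (r0 :: rest) (some 1) none = rest := by
            simpa using PySem.List.slice_from_natCast (r0 :: rest) 1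
          rw [hsl1, hsl2]
          simp only [List.cons_append, List.nil_append]
          rw [PySem.List.foldl_append_singleton_eq_map, PySem.List.foldl_append_singleton_eq_map]
          simp only [List.nil_append]
          rw [pvGrid1_eq r0 rest D mA hLpos hw]
          simp [List.map_map, Function.comp_def]
        · by_cases hs2 : style = 2
          · subst hs2
            rw [if_neg (by norm_num), if_neg (by norm_num), if_pos rfl, if_pos rfl]
            rw [PySem.List.foldl_append_singleton_eq_map]
            simp only [List.nil_append]
            rw [pvSep_eq r0 rest D mA hw]
            rw [PySem.List.foldl_append_eq_flatMap, PySem.List.foldl_append_eq_flatMap]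
            simp only [List.nil_append]
            rw [pvGrid_eq (r0 :: rest) D mA 2 (by norm_num) (List.cons_ne_nil r0 rest) hLpos hw]
            simp [List.flatMap_def, List.map_map, Function.comp_def]
          · rw [if_neg hs0, if_neg hs1, if_neg hs2, if_neg hs2,
                if_neg (fun h => h.elim hs0 hs1)]
            rfl

-- ===== VERDICT (by name: the statement is the Claim_ definition above) =====
theorem tabulify_spec : Claim_equal_tabulify := by
  intro rows style _
  unfold Spec_tabulify
  exact tab_eq rows style
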